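-- pv_equiv track=rewrite | github.com/leolilley/ryeos | rye/rye/.ai/tools/rye/agent/capabilities/tokens/capability_tokens.py | expand_capabilities
-- ===== SOURCE A (Python) =====
-- from typing import Any, Dict, List, Optional, Set
--
-- CAPABILITY_HIERARCHY: Dict[str, List[str]] = {
--     # rye.all grants all rye capabilities
--     "rye.all": [
--         "rye.execute",
--         "rye.search",
--         "rye.load",
--         "rye.sign",
--         "rye.help",
--     ],
--     # rye.execute implies search/load/help (need to find things to execute)
--     "rye.execute": [
--         "rye.search",
--         "rye.load",
--         "rye.help",
--     ],
--     # fs.write implies fs.read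
--     "fs.write": ["fs.read"],
-- }
--
-- def expand_capabilities(caps: List[str]) -> Set[str]:
--     """Expand capabilities using the hierarchy.
--
--     If a token has 'rye.execute', it implicitly has
--     'rye.search', 'rye.load', 'rye.help'.
--
--     Args:
--         caps: List of capability strings
--
--     Returns:
--         Set of all capabilities (original + implied)
--     """
--     expanded: Set[str] = set(caps)
--
--     # Keep expanding until no new caps are added
--     changed = True
--     while changed:
--         changed = False
--         for cap in list(expanded):
--             if cap in CAPABILITY_HIERARCHY:
--                 implied = set(CAPABILITY_HIERARCHY[cap])
--                 new_caps = implied - expanded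
--                 if new_caps:
--                     expanded.update(new_caps)
--                     changed = True
--
--     return expanded
-- ===== SOURCE B (Python) =====
-- from typing import Any, Dict, List, Optional, Set
--
-- CAPABILITY_HIERARCHY: Dict[str, List[str]] = {
--     "rye.all": [
--         "rye.execute",
--         "rye.search",
--         "rye.load",
--         "rye.sign",
--         "rye.help",
--     ],
--     "rye.execute": [
--         "rye.search",
--         "rye.load",
--         "rye.help",
--     ],
--     "fs.write": ["fs.read"],
-- }
--
-- def expand_capabilities(caps: List[str]) -> Set[str]:
--     """Expand capabilities using the hierarchy (FIFO worklist / BFS closure)."""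
--     expanded: Set[str] = set(caps)
--     queue: List[str] = list(expanded)
--     i = 0
--     while i < len(queue):
--         cap = queue[i]
--         i += 1
--         for child in CAPABILITY_HIERARCHY.get(cap, ()):
--             if child not in expanded:
--                 expanded.add(child)
--                 queue.append(child)
--     return expanded
-- ===== Notes on version B (the rewrite author's own statement) =====
-- stated objective: idiomatic
-- what changed: Replaced the 'while changed' fixed-point loop that rescans the whole expanded set every round with a one-pass FIFO worklist (BFS) closure: each discovered capability is dequeued and its children examined exactly once, with no rescanning.
import Mathlib
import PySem

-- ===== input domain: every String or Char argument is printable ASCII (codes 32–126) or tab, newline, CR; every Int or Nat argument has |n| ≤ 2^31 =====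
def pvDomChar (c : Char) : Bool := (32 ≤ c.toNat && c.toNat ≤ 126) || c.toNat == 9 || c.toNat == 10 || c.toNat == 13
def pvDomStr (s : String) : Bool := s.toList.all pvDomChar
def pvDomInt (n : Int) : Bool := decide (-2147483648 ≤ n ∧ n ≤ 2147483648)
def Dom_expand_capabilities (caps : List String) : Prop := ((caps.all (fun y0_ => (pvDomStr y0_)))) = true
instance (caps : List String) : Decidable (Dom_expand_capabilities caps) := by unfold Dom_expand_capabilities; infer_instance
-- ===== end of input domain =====

-- B replaces A's 'while changed' fixed-point rescan with a one-pass FIFO worklist (BFS) closure;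
-- equal return value proved (A returns a Python set; both ports represent it as the
-- insertion-ordered duplicate-free list, compared as a set against Python).

-- the shared module constant CAPABILITY_HIERARCHY
def pvH : PySem.Dict String (List String) := PySem.Dict.ofList
  [("rye.all", ["rye.execute", "rye.search", "rye.load", "rye.sign", "rye.help"]),
   ("rye.execute", ["rye.search", "rye.load", "rye.help"]),
   ("fs.write", ["fs.read"])]

-- ===== PORT A =====

-- one 'for cap in list(expanded)' body of A's while-loop, carrying (expanded, changed)
def pvBodyA (st : List String × Bool) (cap : String) : List String × Bool :=
  match PySem.Dict.get? pvH cap with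
  | none => st
  | some chl =>
      let implied := PySem.Set.ofList chl
      let new_caps := PySem.Set.diff implied st.1
      if new_caps.isEmpty then st else (PySem.Set.update st.1 new_caps, true)

-- A's 'while changed' loop; the fuel 7 is only a totality guard: each changed round adds at
-- least one of the 6 capabilities that ever occur as hierarchy values, so the Python loop
-- runs at most 7 rounds (proved below: the value is already the fixed point for any fuel ≥ 2).
def pvLoopA : Nat → List String → List String
  | 0, e => e
  | n + 1, e =>
      let r := List.foldl pvBodyA (e, false) e
      if r.2 then pvLoopA n r.1 else r.1

def expand_capabilities (caps : List String) : List String :=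
  pvLoopA 7 (PySem.Set.ofList caps)

-- ===== PORT B =====

-- 'for child in hierarchy.get(cap, ()): if child not in expanded: add to expanded, push on queue'
def pvStepB (st : List String × List String) (c : String) : List String × List String :=
  if st.1.contains c then st else (st.1 ++ [c], st.2 ++ [c])

-- the FIFO worklist: dequeue a capability, enqueue its fresh children; the fuel is only a
-- totality guard: at most |initial queue| + 6 capabilities are ever dequeued.
def pvWorklist : Nat → List String → List String → List String
  | 0, e, _ => e
  | _ + 1, e, [] => e
  | n + 1, e, cap :: rest =>
      let st := (PySem.Dict.getD pvH cap []).foldl pvStepB (e, [])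
      pvWorklist n st.1 (rest ++ st.2)

def expand_capabilities_alt (caps : List String) : List String :=
  let expanded := PySem.Set.ofList caps
  pvWorklist (expanded.length + 6) expanded expanded

-- ===== PRECONDITION & SPEC =====
def Spec_expand_capabilities (caps : List String) (out : List String) : Prop := out = expand_capabilities_alt caps
instance (caps : List String) (out : List String) : Decidable (Spec_expand_capabilities caps out) := by unfold Spec_expand_capabilities; infer_instance

-- ===== CLAIM (what is proved, stated in full; the proofs are below) =====
def Claim_equal_expand_capabilities : Prop := ∀ (caps : List String), Dom_expand_capabilities caps → Spec_expand_capabilities caps (expand_capabilities caps)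

-- ===== LEMMAS AND PROOFS =====

-- the sequential "append each child not already present" list (the common per-capability step)
def pvG (env : List String) : List String → List String
  | [] => []
  | c :: ch => if env.contains c then pvG env ch else c :: pvG (env ++ [c]) ch

lemma pvG_fresh : ∀ (ch env : List String) (x : String), x ∈ pvG env ch → env.contains x = false := by
  intro ch
  induction ch with
  | nil => intro env x hx; simp [pvG] at hx
  | cons c ch ih =>
    intro env x hx
    simp only [pvG] at hx
    split at hx
    · exact ih env x hx
    · rename_i hnc
      rcases List.mem_cons.1 hx with rfl | hx
      · simpa using hnc
      · have := ih (env ++ [c]) x hx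
        simp only [List.contains_append, Bool.or_eq_false_iff] at this
        exact this.1

lemma pvG_subset : ∀ (ch env : List String) (x : String), x ∈ pvG env ch → x ∈ ch := by
  intro ch
  induction ch with
  | nil => intro env x hx; simp [pvG] at hx
  | cons c ch ih =>
    intro env x hx
    simp only [pvG] at hx
    split at hx
    · exact List.mem_cons_of_mem _ (ih env x hx)
    · rcases List.mem_cons.1 hx with hx | hx
      · simp [hx]
      · exact List.mem_cons_of_mem _ (ih (env ++ [c]) x hx)

lemma pvG_nodup : ∀ (ch env : List String), (pvG env ch).Nodup := by
  intro ch
  induction ch with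
  | nil => intro env; simp [pvG]
  | cons c ch ih =>
    intro env
    simp only [pvG]
    split
    · exact ih env
    · refine List.nodup_cons.2 ⟨fun hc => ?_, ih (env ++ [c])⟩
      have := pvG_fresh ch (env ++ [c]) c hc
      simp at this

-- the six capability strings that ever get added (all values of the hierarchy)
def pvU : List String :=
  ["rye.execute", "rye.search", "rye.load", "rye.sign", "rye.help", "fs.read"]

lemma pvH_cases (cap : String) (ch : List String) (h : PySem.Dict.get? pvH cap = some ch) :
    (cap = "rye.all" ∧ ch = ["rye.execute", "rye.search", "rye.load", "rye.sign", "rye.help"]) ∨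
    (cap = "rye.execute" ∧ ch = ["rye.search", "rye.load", "rye.help"]) ∨
    (cap = "fs.write" ∧ ch = ["fs.read"]) := by
  have hitems : pvH.items =
      [("rye.all", ["rye.execute", "rye.search", "rye.load", "rye.sign", "rye.help"]),
       ("rye.execute", ["rye.search", "rye.load", "rye.help"]),
       ("fs.write", ["fs.read"])] := by decide
  simp only [PySem.Dict.get?, hitems, List.find?_cons] at h
  by_cases hb1 : "rye.all" = cap
  · simp only [show ("rye.all" == cap) = true from by simp [hb1],
      Option.map_some, Option.some.injEq] at h
    exact Or.inl ⟨hb1.symm, h.symm⟩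
  · simp only [show ("rye.all" == cap) = false from by simp [hb1]] at h
    by_cases hb2 : "rye.execute" = cap
    · simp only [show ("rye.execute" == cap) = true from by simp [hb2],
        Option.map_some, Option.some.injEq] at h
      exact Or.inr (Or.inl ⟨hb2.symm, h.symm⟩)
    · simp only [show ("rye.execute" == cap) = false from by simp [hb2]] at h
      by_cases hb3 : "fs.write" = cap
      · simp only [show ("fs.write" == cap) = true from by simp [hb3],
          Option.map_some, Option.some.injEq] at h
        exact Or.inr (Or.inr ⟨hb3.symm, h.symm⟩)
      · simp only [show ("fs.write" == cap) = false from by simp [hb3]] at h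
        simp at h

lemma pvH_vals (cap : String) (ch : List String) (h : PySem.Dict.get? pvH cap = some ch) :
    ∀ x ∈ ch, x ∈ pvU := by
  rcases pvH_cases cap ch h with ⟨_, rfl⟩ | ⟨_, rfl⟩ | ⟨_, rfl⟩ <;> decide

-- the list of capabilities one full pass over snapshot s appends to e
def pvDelta : List String → List String → List String
  | [], _ => []
  | cap :: s, e =>
    match PySem.Dict.get? pvH cap with
    | none => pvDelta s e
    | some chl => pvG e chl ++ pvDelta s (e ++ pvG e chl)

lemma pvG_congr : ∀ (ch env1 env2 : List String),
    (∀ x, env1.contains x = env2.contains x) → pvG env1 ch = pvG env2 ch := by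
  intro ch
  induction ch with
  | nil => intro _ _ _; rfl
  | cons c ch ih =>
    intro env1 env2 h
    simp only [pvG, h c]
    split
    · exact ih env1 env2 h
    · have : ∀ x, (env1 ++ [c]).contains x = (env2 ++ [c]).contains x := by
        intro x; rw [List.contains_append, List.contains_append, h x]
      rw [ih (env1 ++ [c]) (env2 ++ [c]) this]

lemma pvDiff_foldl : ∀ (ch s e : List String), s.Nodup →
    PySem.Set.diff (List.foldl PySem.Set.add s ch) e
      = PySem.Set.diff s e ++ pvG (e ++ s) ch := by
  intro ch
  induction ch with
  | nil => intro s e _; simp [pvG]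
  | cons c ch ih =>
    intro s e hnd
    simp only [List.foldl_cons, pvG]
    by_cases hcs : s.contains c = true
    · have hc' : c ∈ s := by simpa using hcs
      have hadd : PySem.Set.add s c = s := by simp [PySem.Set.add, PySem.Set.contains, hc']
      have hmem : (e ++ s).contains c = true := by
        simp [hc']
      rw [hadd, hmem, if_pos rfl, ih s e hnd]
    · have hc' : c ∉ s := by simpa using hcs
      have hadd : PySem.Set.add s c = s ++ [c] := by simp [PySem.Set.add, PySem.Set.contains, hc']
      have hnd' : (s ++ [c]).Nodup := by
        refine List.Nodup.append hnd (List.nodup_singleton c) (fun a ha hb => ?_)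
        simp only [List.mem_singleton] at hb
        exact hc' (hb ▸ ha)
      rw [hadd, ih (s ++ [c]) e hnd']
      by_cases hce : e.contains c = true
      · have hce'' : c ∈ e := by simpa using hce
        have hmem : (e ++ s).contains c = true := by
          simp [hce'']
        rw [hmem, if_pos rfl]
        have hdiff : PySem.Set.diff (s ++ [c]) e = PySem.Set.diff s e := by
          simp [PySem.Set.diff, List.filter_append, PySem.Set.contains, hce'']
        have hcongr : pvG (e ++ (s ++ [c])) ch = pvG (e ++ s) ch := by
          refine pvG_congr ch _ _ ?_
          intro x
          by_cases hxc : x = c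
          · subst hxc
            simp [hce'']
          · simp [hxc]
        rw [hdiff, hcongr]
      · have hce' : c ∉ e := by simpa using hce
        have hmem : (e ++ s).contains c = false := by
          simp [hce', hc']
        rw [hmem]
        simp only [Bool.false_eq_true, if_false]
        have hdiff : PySem.Set.diff (s ++ [c]) e = PySem.Set.diff s e ++ [c] := by
          simp [PySem.Set.diff, List.filter_append, PySem.Set.contains, hce']
        rw [hdiff]
        have : e ++ (s ++ [c]) = (e ++ s) ++ [c] := by simp
        rw [this]
        simp

lemma pvDiff_eq_g (ch e : List String) :
    PySem.Set.diff (PySem.Set.ofList ch) e = pvG e ch := by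
  have := pvDiff_foldl ch [] e List.nodup_nil
  simpa [PySem.Set.ofList, PySem.Set.empty, PySem.Set.diff] using this

lemma pvUpdate_g : ∀ (ch e : List String), PySem.Set.update e (pvG e ch) = e ++ pvG e ch := by
  intro ch
  induction ch with
  | nil => intro e; simp [pvG, PySem.Set.update]
  | cons c ch ih =>
    intro e
    simp only [pvG]
    split
    · exact ih e
    · have hadd : PySem.Set.add e c = e ++ [c] := by
        simp only [PySem.Set.add, PySem.Set.contains]
        rw [if_neg (by simpa using ‹¬ e.contains c = true›)]
      have : PySem.Set.update e (c :: pvG (e ++ [c]) ch) = PySem.Set.update (e ++ [c]) (pvG (e ++ [c]) ch) := by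
        simp [PySem.Set.update, hadd]
      rw [this, ih (e ++ [c])]
      simp

lemma pvBodyA_none (e : List String) (c : Bool) (cap : String)
    (h : PySem.Dict.get? pvH cap = none) : pvBodyA (e, c) cap = (e, c) := by
  simp [pvBodyA, h]

lemma pvBodyA_some (e : List String) (c : Bool) (cap : String) (chl : List String)
    (h : PySem.Dict.get? pvH cap = some chl) :
    pvBodyA (e, c) cap = (e ++ pvG e chl, c || !(pvG e chl).isEmpty) := by
  simp only [pvBodyA, h]
  by_cases hg : pvG e chl = []
  · simp [pvDiff_eq_g, hg]
  · have hg' : (pvG e chl).isEmpty = false := by simpa [List.isEmpty_eq_false_iff] using hg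
    simp [pvDiff_eq_g, pvUpdate_g, hg']

lemma pvPassA_eq : ∀ (s e : List String) (c : Bool),
    List.foldl pvBodyA (e, c) s = (e ++ pvDelta s e, c || !(pvDelta s e).isEmpty) := by
  intro s
  induction s with
  | nil => intro e c; simp [pvDelta]
  | cons cap s ih =>
    intro e c
    rcases hcap : PySem.Dict.get? pvH cap with _ | chl
    · rw [List.foldl_cons, pvBodyA_none e c cap hcap, ih e c]
      simp [pvDelta, hcap]
    · rw [List.foldl_cons, pvBodyA_some e c cap chl hcap,
        ih (e ++ pvG e chl) (c || !(pvG e chl).isEmpty)]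
      have hiso : ∀ (a b : List String), (a ++ b).isEmpty = (a.isEmpty && b.isEmpty) := by
        intro a b; cases a <;> simp
      simp [pvDelta, hcap, hiso, Bool.or_assoc, List.append_assoc]

lemma pvDelta_fresh : ∀ (s e : List String) (x : String), x ∈ pvDelta s e → e.contains x = false := by
  intro s
  induction s with
  | nil => intro e x hx; simp [pvDelta] at hx
  | cons cap s ih =>
    intro e x hx
    rcases hcap : PySem.Dict.get? pvH cap with _ | chl
    · simp only [pvDelta, hcap] at hx; exact ih e x hx
    · simp only [pvDelta, hcap] at hx
      rcases List.mem_append.1 hx with hx | hx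
      · exact pvG_fresh chl e x hx
      · have := ih (e ++ pvG e chl) x hx
        simp only [List.contains_append, Bool.or_eq_false_iff] at this
        exact this.1

lemma pvDelta_subU : ∀ (s e : List String) (x : String), x ∈ pvDelta s e → x ∈ pvU := by
  intro s
  induction s with
  | nil => intro e x hx; simp [pvDelta] at hx
  | cons cap s ih =>
    intro e x hx
    rcases hcap : PySem.Dict.get? pvH cap with _ | chl
    · simp only [pvDelta, hcap] at hx; exact ih e x hx
    · simp only [pvDelta, hcap] at hx
      rcases List.mem_append.1 hx with hx | hx
      · exact pvH_vals cap chl hcap x (pvG_subset chl e x hx)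
      · exact ih (e ++ pvG e chl) x hx

lemma pvDelta_nodup : ∀ (s e : List String), (pvDelta s e).Nodup := by
  intro s
  induction s with
  | nil => intro e; simp [pvDelta]
  | cons cap s ih =>
    intro e
    rcases hcap : PySem.Dict.get? pvH cap with _ | chl
    · simp only [pvDelta, hcap]
      exact ih e
    · simp only [pvDelta, hcap]
      have hdisj : (pvG e chl).Disjoint (pvDelta s (e ++ pvG e chl)) := by
        intro a ha hb
        have hfr := pvDelta_fresh s (e ++ pvG e chl) a hb
        simp only [List.contains_append, Bool.or_eq_false_iff] at hfr
        have hca : (pvG e chl).contains a = true := by simpa using ha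
        rw [hfr.2] at hca
        cases hca
      exact List.Nodup.append (pvG_nodup chl e) (ih (e ++ pvG e chl)) hdisj

lemma pvDelta_len_le (e : List String) : (pvDelta e e).length ≤ 6 := by
  have hnd := pvDelta_nodup e e
  have hsub : (pvDelta e e).toFinset ⊆ pvU.toFinset := by
    intro x hx
    simp only [List.mem_toFinset] at hx ⊢
    exact pvDelta_subU e e x hx
  have hcard := Finset.card_le_card hsub
  rw [List.toFinset_card_of_nodup hnd] at hcard
  have : pvU.toFinset.card = 6 := by decide
  omega

lemma pvG_mem_complete : ∀ (ch env : List String) (x : String), x ∈ ch → x ∈ env ++ pvG env ch := by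
  intro ch
  induction ch with
  | nil => intro env x hx; simp at hx
  | cons c ch ih =>
    intro env x hx
    simp only [pvG]
    by_cases hc : env.contains c = true
    · rw [if_pos hc]
      rcases List.mem_cons.1 hx with hx | hx
      · subst hx; exact List.mem_append.2 (Or.inl (by simpa using hc))
      · exact ih env x hx
    · rw [if_neg hc]
      rcases List.mem_cons.1 hx with hx | hx
      · subst hx; simp
      · have := ih (env ++ [c]) x hx
        simp only [List.mem_append, List.mem_cons] at this ⊢
        tauto

-- every child of a capability processed by the pass is in the pass's result
lemma pvDelta_children : ∀ (s e : List String) (cap : String) (chl : List String),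
    cap ∈ s → PySem.Dict.get? pvH cap = some chl → ∀ x ∈ chl, x ∈ e ++ pvDelta s e := by
  intro s
  induction s with
  | nil =>
    intro e cap chl h
    simp at h
  | cons cap0 s ih =>
    intro e cap chl hmem hcap x hx
    rcases List.mem_cons.1 hmem with hmem | hmem
    · subst hmem
      simp only [pvDelta, hcap]
      have := pvG_mem_complete chl e x hx
      simp only [List.mem_append] at this ⊢
      tauto
    · rcases hcap0 : PySem.Dict.get? pvH cap0 with _ | chl0
      · simp only [pvDelta, hcap0]
        exact ih e cap chl hmem hcap x hx
      · simp only [pvDelta, hcap0]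
        have := ih (e ++ pvG e chl0) cap chl hmem hcap x hx
        simpa [List.mem_append, or_assoc] using this

-- every element the pass adds is a child of some processed capability
lemma pvDelta_src : ∀ (s e : List String) (x : String), x ∈ pvDelta s e →
    ∃ cap ∈ s, ∃ chl, PySem.Dict.get? pvH cap = some chl ∧ x ∈ chl := by
  intro s
  induction s with
  | nil => intro e x hx; simp [pvDelta] at hx
  | cons cap0 s ih =>
    intro e x hx
    rcases hcap0 : PySem.Dict.get? pvH cap0 with _ | chl0
    · simp only [pvDelta, hcap0] at hx
      obtain ⟨cap, hc, r⟩ := ih e x hx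
      exact ⟨cap, List.mem_cons_of_mem _ hc, r⟩
    · simp only [pvDelta, hcap0] at hx
      rcases List.mem_append.1 hx with hx | hx
      · exact ⟨cap0, by simp, chl0, hcap0, pvG_subset chl0 e x hx⟩
      · obtain ⟨cap, hc, r⟩ := ih (e ++ pvG e chl0) x hx
        exact ⟨cap, List.mem_cons_of_mem _ hc, r⟩

def pvClosed (e : List String) : Prop :=
  ∀ cap ∈ e, ∀ chl, PySem.Dict.get? pvH cap = some chl → ∀ x ∈ chl, x ∈ e

lemma pvG_nil_of_subset (ch e : List String) (h : ∀ x ∈ ch, x ∈ e) : pvG e ch = [] := by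
  induction ch with
  | nil => rfl
  | cons c ch ih =>
    simp only [pvG]
    rw [if_pos (by simpa using h c (by simp))]
    exact ih (fun x hx => h x (List.mem_cons_of_mem _ hx))

lemma pvDelta_nil_of_closed : ∀ (s e : List String), pvClosed e → (∀ x ∈ s, x ∈ e) → pvDelta s e = [] := by
  intro s
  induction s with
  | nil => intro e _ _; rfl
  | cons cap s ih =>
    intro e hcl hsub
    rcases hcap : PySem.Dict.get? pvH cap with _ | chl
    · simp only [pvDelta, hcap]
      exact ih e hcl (fun x hx => hsub x (List.mem_cons_of_mem _ hx))
    · simp only [pvDelta, hcap]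
      have hch : ∀ x ∈ chl, x ∈ e := hcl cap (hsub cap (by simp)) chl hcap
      rw [pvG_nil_of_subset chl e hch]
      simpa using ih e hcl (fun x hx => hsub x (List.mem_cons_of_mem _ hx))

-- the result of one pass is closed under the hierarchy (the depth of the concrete hierarchy is one)
lemma pvClosed_after_pass (S : List String) : pvClosed (S ++ pvDelta S S) := by
  intro cap hcap chl hch x hx
  rcases List.mem_append.1 hcap with hS | hD
  · exact pvDelta_children S S cap chl hS hch x hx
  · obtain ⟨cap0, hcap0S, chl0, hget0, hmem0⟩ := pvDelta_src S S cap hD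
    rcases pvH_cases cap chl hch with ⟨hc1, hl1⟩ | ⟨hc1, hl1⟩ | ⟨hc1, hl1⟩
    · -- "rye.all" is never a hierarchy value
      rcases pvH_cases cap0 chl0 hget0 with ⟨_, hv⟩ | ⟨_, hv⟩ | ⟨_, hv⟩ <;>
        · rw [hc1, hv] at hmem0
          exact absurd hmem0 (by decide)
    · -- "rye.execute" only appears among the children of "rye.all", whose child list covers chl
      rcases pvH_cases cap0 chl0 hget0 with ⟨hk, hv⟩ | ⟨hk, hv⟩ | ⟨hk, hv⟩
      · refine pvDelta_children S S cap0 chl0 hcap0S hget0 x ?_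
        rw [hl1] at hx
        rw [hv]
        fin_cases hx <;> decide
      · rw [hc1, hv] at hmem0
        exact absurd hmem0 (by decide)
      · rw [hc1, hv] at hmem0
        exact absurd hmem0 (by decide)
    · -- "fs.write" is never a hierarchy value
      rcases pvH_cases cap0 chl0 hget0 with ⟨_, hv⟩ | ⟨_, hv⟩ | ⟨_, hv⟩ <;>
        · rw [hc1, hv] at hmem0
          exact absurd hmem0 (by decide)

-- one round of A's loop on an already-closed set returns it unchanged
lemma pvLoopA_closed (n : Nat) (e : List String) (h : pvDelta e e = []) :
    pvLoopA (n + 1) e = e := by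
  rw [pvLoopA, pvPassA_eq, h]
  simp

-- A's fueled loop reaches the fixed point for any fuel ≥ 2
lemma pvLoopA_eq (n : Nat) (e : List String) : pvLoopA (n + 2) e = e ++ pvDelta e e := by
  have hnil : pvDelta (e ++ pvDelta e e) (e ++ pvDelta e e) = [] :=
    pvDelta_nil_of_closed _ _ (pvClosed_after_pass e) (fun x hx => hx)
  cases h : (pvDelta e e).isEmpty
  · rw [pvLoopA, pvPassA_eq]
    simp only [Bool.false_or, h, Bool.not_false, if_true]
    exact pvLoopA_closed (n := n) _ hnil
  · rw [pvLoopA, pvPassA_eq]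
    simp [List.isEmpty_iff.1 h]

-- B's inner for-loop over the children
lemma pvFoldB : ∀ (ch e acc : List String),
    ch.foldl pvStepB (e, acc) = (e ++ pvG e ch, acc ++ pvG e ch) := by
  intro ch
  induction ch with
  | nil => intro e acc; simp [pvG]
  | cons c ch ih =>
    intro e acc
    simp only [List.foldl_cons, pvStepB, pvG]
    split
    · exact ih e acc
    · rw [ih (e ++ [c]) (acc ++ [c])]
      simp

-- processing a prefix s of the queue appends pvDelta s e to both the result and the queue
lemma pvWorklist_pass : ∀ (s : List String) (m : Nat) (e q : List String),
    pvWorklist (s.length + m) e (s ++ q) = pvWorklist m (e ++ pvDelta s e) (q ++ pvDelta s e) := by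
  intro s
  induction s with
  | nil => intro m e q; simp [pvDelta]
  | cons cap s ih =>
    intro m e q
    rcases hcap : PySem.Dict.get? pvH cap with _ | chl
    · have hD : PySem.Dict.getD pvH cap [] = [] := by simp [PySem.Dict.getD, hcap]
      simp only [List.cons_append, List.length_cons, Nat.succ_add, pvWorklist, pvDelta, hcap,
        hD, List.foldl_nil, List.append_nil]
      exact ih m e q
    · have hD : PySem.Dict.getD pvH cap [] = chl := by simp [PySem.Dict.getD, hcap]
      simp only [List.cons_append, List.length_cons, Nat.succ_add, pvWorklist, pvDelta, hcap, hD]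
      rw [pvFoldB]
      have hassoc : (s ++ q) ++ pvG e chl = s ++ (q ++ pvG e chl) := by simp
      simp only [List.nil_append]
      rw [hassoc, ih m (e ++ pvG e chl) (q ++ pvG e chl)]
      simp

-- once the result is closed and the queue lies inside it, the worklist is a no-op
lemma pvWorklist_fixed : ∀ (q : List String) (n : Nat) (e : List String),
    pvClosed e → (∀ x ∈ q, x ∈ e) → q.length ≤ n → pvWorklist n e q = e := by
  intro q
  induction q with
  | nil =>
    intro n e _ _ _
    cases n <;> rw [pvWorklist]
  | cons cap rest ih =>
    intro n e hcl hsub hlen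
    cases n with
    | zero => simp at hlen
    | succ m =>
      rcases hcap : PySem.Dict.get? pvH cap with _ | chl
      · have hD : PySem.Dict.getD pvH cap [] = [] := by simp [PySem.Dict.getD, hcap]
        simp only [pvWorklist, hD, List.foldl_nil, List.append_nil]
        exact ih m e hcl (fun x hx => hsub x (List.mem_cons_of_mem _ hx))
          (by simpa [Nat.succ_le_succ_iff] using hlen)
      · have hD : PySem.Dict.getD pvH cap [] = chl := by simp [PySem.Dict.getD, hcap]
        simp only [pvWorklist, hD]
        have hch : ∀ x ∈ chl, x ∈ e := hcl cap (hsub cap (by simp)) chl hcap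
        rw [pvFoldB, pvG_nil_of_subset chl e hch]
        simpa using ih m e hcl (fun x hx => hsub x (List.mem_cons_of_mem _ hx))
          (by simpa [Nat.succ_le_succ_iff] using hlen)

lemma pvWorklist_full (e : List String) : pvWorklist (e.length + 6) e e = e ++ pvDelta e e := by
  have h := pvWorklist_pass e 6 e []
  simp only [List.append_nil, List.nil_append] at h
  rw [h]
  exact pvWorklist_fixed _ _ _ (pvClosed_after_pass e)
    (fun x hx => List.mem_append.2 (Or.inr hx)) (pvDelta_len_le e)

-- ===== VERDICT (by name: the statement is the Claim_ definition above) =====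
theorem expand_capabilities_spec : Claim_equal_expand_capabilities := by
  intro caps _
  unfold Spec_expand_capabilities expand_capabilities expand_capabilities_alt
  rw [show (7 : Nat) = 5 + 2 from rfl, pvLoopA_eq, pvWorklist_full]
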